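-- pv_equiv track=rewrite | github.com/hemanthbabu164/Coforge-Internship | Document Summarizer/doc_summarizer_backend/summarizer/scripts/doc_summarizer.py | merge_short_lines
-- ===== SOURCE A (Python) =====
-- def merge_short_lines(content, threshold=40):
--     lines = content.split('\n')
--     merged_lines = []
--     current_line = ""
--
--     for line in lines:
--         if len(line.strip()) < threshold:
--             current_line += " " + line.strip()
--         else:
--             if current_line:
--                 merged_lines.append(current_line.strip())
--                 current_line = ""
--             merged_lines.append(line.strip())
--
--     if current_line:
--         merged_lines.append(current_line.strip())
--
--     return "\n".join(merged_lines)
-- ===== SOURCE B (Python) =====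
-- def merge_short_lines(content, threshold=40):
--     lines = content.split('\n')
--     entries = []
--     i = 0
--     n = len(lines)
--     while i < n:
--         if len(lines[i].strip()) < threshold:
--             j = i
--             while j < n and len(lines[j].strip()) < threshold:
--                 j += 1
--             entries.append(' '.join(x.strip() for x in lines[i:j]).strip())
--             i = j
--         else:
--             entries.append(lines[i].strip())
--             i += 1
--     return '\n'.join(entries)
-- ===== Notes on version B (the rewrite author's own statement) =====
-- stated objective: alternative
-- what changed: Replaces A's accumulate-and-flush buffer fold with a two-level scan that consumes each maximal run of short lines at once and joins it in one step.
import Mathlib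
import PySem

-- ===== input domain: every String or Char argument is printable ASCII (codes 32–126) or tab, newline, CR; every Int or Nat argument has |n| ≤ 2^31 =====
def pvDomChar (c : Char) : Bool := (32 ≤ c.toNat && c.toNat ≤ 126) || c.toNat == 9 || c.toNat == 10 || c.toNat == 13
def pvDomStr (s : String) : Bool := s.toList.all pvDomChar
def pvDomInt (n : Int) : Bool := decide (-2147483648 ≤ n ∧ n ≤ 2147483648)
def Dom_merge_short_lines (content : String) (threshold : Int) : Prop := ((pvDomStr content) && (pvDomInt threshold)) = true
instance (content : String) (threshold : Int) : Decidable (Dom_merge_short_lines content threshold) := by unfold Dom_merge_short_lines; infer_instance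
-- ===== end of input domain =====

-- B replaces A's accumulate-and-flush buffer with a two-level scan that consumes each maximal
-- run of short lines at once (idiomatic run-grouping); return values are proved equal on all inputs.


-- ===== PORT A =====
def merge_short_lines (content : String) (threshold : Int) : String :=
  let lines := (PySem.Str.split? content "\n").getD []
  let st := lines.foldl
    (fun (st : List String × String) line =>
      if PySem.Str.len (PySem.Str.strip line) < threshold then
        (st.1, st.2 ++ (" " ++ PySem.Str.strip line))
      else
        ((if st.2 ≠ "" then st.1 ++ [PySem.Str.strip st.2] else st.1) ++ [PySem.Str.strip line], ""))
    ([], "")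
  PySem.Str.join "\n" (if st.2 ≠ "" then st.1 ++ [PySem.Str.strip st.2] else st.1)

-- ===== PORT B =====
-- line is "short" iff len(line.strip()) < threshold
def pvShort (t : Int) (l : String) : Bool := decide (PySem.Str.len (PySem.Str.strip l) < t)

-- B's outer while loop: each short line opens an inner while that consumes the maximal short run
-- (takeWhile/dropWhile = the inner 'while j < n and short' scan and 'i = j')
def pvRuns (t : Int) : List String → List String
  | [] => []
  | l :: ls =>
    if pvShort t l then
      PySem.Str.strip (PySem.Str.join " " ((l :: ls.takeWhile (pvShort t)).map PySem.Str.strip))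
        :: pvRuns t (ls.dropWhile (pvShort t))
    else
      PySem.Str.strip l :: pvRuns t ls
termination_by ls => ls.length
decreasing_by
  · simpa using Nat.lt_succ_of_le (List.length_dropWhile_le _ _)
  · simp

def merge_short_lines_alt (content : String) (threshold : Int) : String :=
  PySem.Str.join "\n" (pvRuns threshold ((PySem.Str.split? content "\n").getD []))

-- ===== PRECONDITION & SPEC =====
def Spec_merge_short_lines (content : String) (threshold : Int) (out : String) : Prop := out = merge_short_lines_alt content threshold
instance (content : String) (threshold : Int) (out : String) : Decidable (Spec_merge_short_lines content threshold out) := by unfold Spec_merge_short_lines; infer_instance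

-- ===== CLAIM (what is proved, stated in full; the proofs are below) =====
def Claim_equal_merge_short_lines : Prop := ∀ (content : String) (threshold : Int), Dom_merge_short_lines content threshold → Spec_merge_short_lines content threshold (merge_short_lines content threshold)

-- ===== LEMMAS AND PROOFS =====

-- A's final 'if current_line: append(current_line.strip())'
def pvFlush (cur : String) : List String := if cur ≠ "" then [PySem.Str.strip cur] else []

-- recursive characterisation of A's loop, with the pending buffer as second argument
def pvARun (t : Int) : List String → String → List String
  | [], cur => pvFlush cur
  | l :: ls, cur =>
    if pvShort t l then pvARun t ls (cur ++ (" " ++ PySem.Str.strip l))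
    else pvFlush cur ++ PySem.Str.strip l :: pvARun t ls ""

-- the buffer A accumulates over a run: " s1 s2 … sn"
def pvRep : List String → String
  | [] => ""
  | x :: xs => (" " ++ PySem.Str.strip x) ++ pvRep xs

theorem pv_ne_empty_iff (s : String) : s ≠ "" ↔ s.toList ≠ [] := by
  constructor
  · intro h h2
    exact h (String.toList_inj.mp (by simpa using h2))
  · intro h h2; subst h2; simp at h

theorem pv_strip_space (s : String) : PySem.Str.strip (" " ++ s) = PySem.Str.strip s := by
  apply String.toList_inj.mp
  rw [PySem.Str.toList_strip, PySem.Str.toList_strip]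
  have h : (" " ++ s).toList = ' ' :: s.toList := by simp
  rw [h]
  simp only [PySem.Chars.strip, PySem.Chars.lstrip, List.dropWhile_cons]
  rw [if_pos (by decide)]

theorem pv_rep_toList : ∀ xs : List String, (pvRep xs).toList = (xs.map (fun x => ' ' :: (PySem.Str.strip x).toList)).flatten := by
  intro xs; induction xs with
  | nil => simp [pvRep]
  | cons x xs ih => simp [pvRep, ih]

theorem pv_join_space (c : List Char) (cs : List (List Char)) :
    PySem.Chars.join [' '] (c :: cs) = c ++ (cs.map (fun d => ' ' :: d)).flatten := by
  induction cs generalizing c with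
  | nil => simp [PySem.Chars.join_singleton]
  | cons d ds ih => rw [PySem.Chars.join_cons_cons, ih d]; simp

theorem pv_rep_eq_join (x : String) (xs : List String) :
    pvRep (x :: xs) = " " ++ PySem.Str.join " " ((x :: xs).map PySem.Str.strip) := by
  apply String.toList_inj.mp
  rw [pv_rep_toList]
  have h2 : (" " ++ PySem.Str.join " " ((x :: xs).map PySem.Str.strip)).toList
      = ' ' :: (PySem.Str.join " " ((x :: xs).map PySem.Str.strip)).toList := by simp
  rw [h2, PySem.Str.toList_join]
  have h3 : (" " : String).toList = [' '] := by decide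
  rw [h3]
  simp only [List.map_cons, List.map_map]
  rw [pv_join_space]
  simp [Function.comp_def, PySem.Str.toList_strip]

theorem pv_rep_ne_empty (x : String) (xs : List String) : pvRep (x :: xs) ≠ "" := by
  rw [pv_ne_empty_iff, pv_rep_toList]
  simp

theorem pv_aRun_shortrun (t : Int) : ∀ (run : List String), (∀ x ∈ run, pvShort t x = true) →
    ∀ (rest : List String) (cur : String), pvARun t (run ++ rest) cur = pvARun t rest (cur ++ pvRep run) := by
  intro run; induction run with
  | nil => intro _ rest cur; simp [pvRep]
  | cons x xs ih =>
    intro h rest cur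
    have hx : pvShort t x = true := h x (by simp)
    simp only [List.cons_append, pvARun, hx, if_pos]
    rw [ih (fun y hy => h y (by simp [hy])) rest]
    have : cur ++ (" " ++ PySem.Str.strip x) ++ pvRep xs = cur ++ pvRep (x :: xs) := by
      show _ = cur ++ ((" " ++ PySem.Str.strip x) ++ pvRep xs)
      rw [String.append_assoc]
    rw [this]

theorem pv_aRun_flush (t : Int) (rest : List String)
    (h : rest = [] ∨ ∃ r rs, rest = r :: rs ∧ pvShort t r = false) (cur : String) :
    pvARun t rest cur = pvFlush cur ++ pvARun t rest "" := by
  rcases h with h | ⟨r, rs, hrr, hr⟩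
  · subst h; simp [pvARun, pvFlush]
  · subst hrr; simp [pvARun, hr, pvFlush]

theorem pv_head_dropWhile {p : String → Bool} : ∀ (ls : List String) (r : String) (rs : List String),
    ls.dropWhile p = r :: rs → p r = false := by
  intro ls; induction ls with
  | nil => intro r rs h; simp at h
  | cons x xs ih =>
    intro r rs h
    by_cases hx : p x = true
    · rw [List.dropWhile_cons, if_pos hx] at h; exact ih r rs h
    · rw [List.dropWhile_cons, if_neg hx] at h
      cases h; simpa using hx

theorem pv_runs_eq (t : Int) : ∀ (n : Nat) (ls : List String), ls.length ≤ n → pvARun t ls "" = pvRuns t ls := by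
  intro n; induction n with
  | zero => intro ls h; rw [List.length_eq_zero_iff.mp (Nat.le_zero.mp h)]; simp [pvARun, pvRuns, pvFlush]
  | succ n ih =>
    intro ls hlen
    cases ls with
    | nil => simp [pvARun, pvRuns, pvFlush]
    | cons l ls =>
      by_cases hl : pvShort t l = true
      · have hsplit : ls = ls.takeWhile (pvShort t) ++ ls.dropWhile (pvShort t) :=
          (List.takeWhile_append_dropWhile).symm
        have hdw : ls.dropWhile (pvShort t) = [] ∨
            ∃ r rs, ls.dropWhile (pvShort t) = r :: rs ∧ pvShort t r = false := by
          cases hc : ls.dropWhile (pvShort t) with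
          | nil => exact Or.inl rfl
          | cons r rs => exact Or.inr ⟨r, rs, rfl, pv_head_dropWhile ls r rs hc⟩
        have step1 : pvARun t (l :: ls) "" = pvARun t ls ("" ++ (" " ++ PySem.Str.strip l)) := by
          simp [pvARun, hl]
        rw [step1]
        have hcur : "" ++ (" " ++ PySem.Str.strip l) = " " ++ PySem.Str.strip l := by simp
        rw [hcur]
        conv_lhs => rw [hsplit]
        rw [pv_aRun_shortrun t _ (fun x hx => List.mem_takeWhile_imp hx) _ _]
        have hrep : " " ++ PySem.Str.strip l ++ pvRep (ls.takeWhile (pvShort t))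
            = pvRep (l :: ls.takeWhile (pvShort t)) := by
          simp [pvRep]
        rw [hrep, pv_aRun_flush t _ hdw]
        have hfl : pvFlush (pvRep (l :: ls.takeWhile (pvShort t)))
            = [PySem.Str.strip (PySem.Str.join " " ((l :: ls.takeWhile (pvShort t)).map PySem.Str.strip))] := by
          rw [pvFlush, if_pos (pv_rep_ne_empty _ _), pv_rep_eq_join, pv_strip_space]
        rw [hfl, ih _ (le_trans (List.length_dropWhile_le _ _) (Nat.le_of_succ_le_succ hlen))]
        rw [pvRuns]
        simp [hl]
      · have hstep : pvARun t (l :: ls) "" = PySem.Str.strip l :: pvARun t ls "" := by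
          simp [pvARun, hl, pvFlush]
        rw [hstep, ih ls (Nat.le_of_succ_le_succ hlen), pvRuns]
        simp [hl]

theorem pv_fold_eq (t : Int) : ∀ (ls : List String) (acc : List String) (cur : String),
    (if (ls.foldl
      (fun (st : List String × String) line =>
        if PySem.Str.len (PySem.Str.strip line) < t then
          (st.1, st.2 ++ (" " ++ PySem.Str.strip line))
        else
          ((if st.2 ≠ "" then st.1 ++ [PySem.Str.strip st.2] else st.1) ++ [PySem.Str.strip line], ""))
      (acc, cur)).2 ≠ ""
     then (ls.foldl
      (fun (st : List String × String) line =>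
        if PySem.Str.len (PySem.Str.strip line) < t then
          (st.1, st.2 ++ (" " ++ PySem.Str.strip line))
        else
          ((if st.2 ≠ "" then st.1 ++ [PySem.Str.strip st.2] else st.1) ++ [PySem.Str.strip line], ""))
      (acc, cur)).1 ++ [PySem.Str.strip (ls.foldl
      (fun (st : List String × String) line =>
        if PySem.Str.len (PySem.Str.strip line) < t then
          (st.1, st.2 ++ (" " ++ PySem.Str.strip line))
        else
          ((if st.2 ≠ "" then st.1 ++ [PySem.Str.strip st.2] else st.1) ++ [PySem.Str.strip line], ""))
      (acc, cur)).2]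
     else (ls.foldl
      (fun (st : List String × String) line =>
        if PySem.Str.len (PySem.Str.strip line) < t then
          (st.1, st.2 ++ (" " ++ PySem.Str.strip line))
        else
          ((if st.2 ≠ "" then st.1 ++ [PySem.Str.strip st.2] else st.1) ++ [PySem.Str.strip line], ""))
      (acc, cur)).1)
    = acc ++ pvARun t ls cur := by
  intro ls; induction ls with
  | nil => intro acc cur; simp only [List.foldl_nil, pvARun, pvFlush]; split <;> simp
  | cons l ls ih =>
    intro acc cur
    by_cases hl : PySem.Str.len (PySem.Str.strip l) < t
    · simp only [List.foldl_cons, if_pos hl]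
      rw [ih acc (cur ++ (" " ++ PySem.Str.strip l))]
      have : pvShort t l = true := decide_eq_true hl
      simp [pvARun, this]
    · simp only [List.foldl_cons, if_neg hl]
      rw [ih _ ""]
      have hsh : pvShort t l = false := decide_eq_false hl
      simp only [pvARun, hsh, Bool.false_eq_true, if_false, pvFlush]
      split <;> simp

-- ===== VERDICT (by name: the statement is the Claim_ definition above) =====
theorem merge_short_lines_spec : Claim_equal_merge_short_lines := by
  intro content threshold _
  unfold Spec_merge_short_lines merge_short_lines merge_short_lines_alt
  simp only []
  rw [pv_fold_eq threshold ((PySem.Str.split? content "\n").getD []) [] ""]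
  rw [pv_runs_eq threshold ((PySem.Str.split? content "\n").getD []).length _ (le_refl _)]
  simp
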